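-- pv_equiv track=rewrite | github.com/edggy/gf2 | gf2_math.py | _gf2exteuc
-- ===== SOURCE A (Python) =====
-- def _gf2bitlength(a):
--     """
--     Computes the length of a polynomial coefficient bit vector = degree + 1.
--
--     Parameters
--     ----------
--     a : integer
--         Polynomial coefficient bit vector.
--
--     Returns
--     -------
--     n : integer
--         length of  polynomial `a`.
--     """
--     if a == 0:
--         return 0
--     n = 1
--     while (a >> n) > 0:
--         n <<= 1
--     n >>= 1
--     b = n
--     while b > 0:
--         b >>= 1
--         nnew = n ^ b
--         if (a >> nnew) > 0:
--             n = nnew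
--     return n + 1
--
-- def _gf2divmodvect(avec,dvec):
--     """
--     Computes `q` = `a`/`d` and `r` = `a`%`d` in a vectorized form.
--
--     Parameters
--     ----------
--     avec : array_like
--         Array of dividends, each of which should be a polynomial coefficient bit vector
--     dvec : array_like
--         Array of divisors, each of which should be a polynomial coefficient bit vector
--
--     Returns
--     -------
--     q : array_like
--         Array of quotients, each of which is a polynomial coefficient bit vector
--     r : array_like
--         Array of quotients, each of which is a polynomial coefficient bit vector
--     """
--     na = _gf2bitlength(avec[0])
--     nd = _gf2bitlength(dvec[0])
--     i = na - nd
--     q = 0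
--     test = 1 << (na-1)
--     while i >= 0:
--         if (avec[0] & test) != 0:
--             avec = [a ^ (d << i) for (a,d) in zip(avec,dvec)]
--             q |= (1 << i)
--         i -= 1
--         test >>= 1
--     r = avec
--     return (q,r)
--
-- def _gf2exteuc(a,b):
--     r"""
--     Computes the extended Euclidean algorithm using Blankinship's method.
--
--     Returns :math:`(g,u,v)` such that :math:`g = \gcd(a,b)` and :math:`g = au+bv` in :math:`GF(2)`.
--
--     Parameters
--     ----------
--     a, b : integer
--         Polynomial coefficient bit vectors.
--
--     Returns
--     -------
--     g : integer
--         Polynomial coefficient bit vector :math:`g = \gcd(a,b)`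
--     u, v : integer
--         Polynomial coefficient bit vectors where :math:`g = au+bv`
--     """
--     arow = [a,1,0]
--     brow = [b,0,1]
--     while True:
--         (_,rrow) = _gf2divmodvect(arow, brow)
--         if rrow[0] == 0:
--             break
--         arow = brow
--         brow = rrow
--     return tuple(brow)
-- ===== SOURCE B (Python) =====
-- def _gf2bitlen(a):
--     return a.bit_length()
--
-- def _gf2mul(a, b):
--     """Carry-less (GF(2)) product of two polynomial bit vectors."""
--     p = 0
--     while a:
--         if a & 1:
--             p ^= b
--         a >>= 1
--         b <<= 1
--     return p
--
-- def _gf2divmod(a, d):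
--     """GF(2) polynomial divmod: returns (q, r) with a = q*d ^ r, deg r < deg d."""
--     nd = d.bit_length()
--     q = 0
--     while True:
--         shift = a.bit_length() - nd
--         if shift < 0:
--             return (q, a)
--         a ^= d << shift
--         q ^= 1 << shift
--
-- def _gf2exteuc(a, b):
--     r0, u0, v0 = a, 1, 0
--     r1, u1, v1 = b, 0, 1
--     while True:
--         q, r = _gf2divmod(r0, r1)
--         if r == 0:
--             return (r1, u1, v1)
--         r0, u0, v0, r1, u1, v1 = r1, u1, v1, r, u0 ^ _gf2mul(q, u1), v0 ^ _gf2mul(q, v1)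
-- ===== Notes on version B (the rewrite author's own statement) =====
-- stated objective: alternative
-- what changed: Replaces Blankinship's vectorized 3-element rows and the hand-rolled binary-search bit length with the classic scalar extended Euclid: a GF(2) divmod that uses int.bit_length() to jump straight to each set quotient bit, and coefficient updates u0 ^ _gf2mul(q, u1) by explicit carry-less multiplication.
-- outside the precondition, e.g. on _gf2exteuc(-1, -1): A returns (-1, 0, 1), B returns (-1, 0, 1)
import Mathlib
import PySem

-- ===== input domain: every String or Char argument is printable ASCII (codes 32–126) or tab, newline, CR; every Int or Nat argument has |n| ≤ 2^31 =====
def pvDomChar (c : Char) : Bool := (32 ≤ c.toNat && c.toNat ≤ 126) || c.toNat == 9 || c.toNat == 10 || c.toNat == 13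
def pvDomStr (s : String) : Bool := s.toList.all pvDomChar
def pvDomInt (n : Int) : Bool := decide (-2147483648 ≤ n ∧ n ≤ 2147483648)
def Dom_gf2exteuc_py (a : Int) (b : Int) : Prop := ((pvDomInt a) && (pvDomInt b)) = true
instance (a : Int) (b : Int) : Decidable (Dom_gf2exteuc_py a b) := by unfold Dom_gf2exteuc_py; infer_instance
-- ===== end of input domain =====

-- B replaces A's vectorized Blankinship rows and hand-rolled binary-search bit length by the
-- classic scalar extended Euclid with a bit_length-based GF(2) divmod and explicit carry-less
-- multiplication for the coefficient updates.

-- ===== PORT A =====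

-- termination helper for the doubling loop of _gf2bitlength (cited by decreasing_by)
theorem pvNatShiftRightDoubleLt (m n : Nat) (h1 : 0 < m >>> n) (hn : 0 < n) :
    m >>> (2 * n) < m >>> n := by
  rw [Nat.shiftRight_eq_div_pow] at h1 ⊢
  rw [Nat.shiftRight_eq_div_pow]
  have hq : 1 ≤ m / 2 ^ n := h1
  have h2 : m / 2 ^ (2 * n) = m / 2 ^ n / 2 ^ n := by
    rw [Nat.div_div_eq_div_mul, ← pow_add, two_mul]
  rw [h2]
  have h3 : (2:Nat) ≤ 2 ^ n := by
    calc (2:Nat) = 2 ^ 1 := rfl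
      _ ≤ 2 ^ n := Nat.pow_le_pow_right (by norm_num) hn
  calc m / 2 ^ n / 2 ^ n ≤ m / 2 ^ n / 2 := Nat.div_le_div_left h3 (by norm_num)
    _ < m / 2 ^ n := Nat.div_lt_self h1 one_lt_two

theorem pvShiftRightDoubleLt (a : Int) (n : Nat) (h1 : 0 < a >>> n) (hn : 0 < n) :
    (a >>> (2 * n)).toNat < (a >>> n).toNat := by
  cases a with
  | ofNat m =>
    have e1 : (Int.ofNat m) >>> n = ((m >>> n : Nat) : Int) := rfl
    have e2 : (Int.ofNat m) >>> (2 * n) = ((m >>> (2 * n) : Nat) : Int) := rfl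
    rw [e1, e2, Int.toNat_natCast, Int.toNat_natCast]
    exact pvNatShiftRightDoubleLt m n (by rw [e1] at h1; exact_mod_cast h1) hn
  | negSucc m =>
    exfalso
    have e1 : (Int.negSucc m) >>> n = Int.negSucc (m >>> n) := rfl
    rw [e1] at h1
    have := Int.negSucc_lt_zero (m >>> n)
    omega

-- while (a >> n) > 0: n <<= 1     (the '0 < n' conjunct is a totality guard: Python's n starts
-- at 1 and only doubles, so it is always true in execution)
def bitLoop1 (a : Int) (n : Nat) : Nat :=
  if h : 0 < a >>> n ∧ 0 < n then bitLoop1 a (2 * n) else n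
termination_by (a >>> n).toNat
decreasing_by exact pvShiftRightDoubleLt a n h.1 h.2

-- while b > 0: b >>= 1; nnew = n ^ b; if (a >> nnew) > 0: n = nnew
def bitLoop2 (a : Int) (n b : Nat) : Nat :=
  if _h : 0 < b then
    let b' := b >>> 1
    let nn := n ^^^ b'
    if 0 < a >>> nn then bitLoop2 a nn b' else bitLoop2 a n b'
  else n
termination_by b
decreasing_by all_goals { simp only [Nat.shiftRight_one]; omega }

-- _gf2bitlength
def gf2bitlen_pyA (a : Int) : Int :=
  if a = 0 then 0
  else
    let n := bitLoop1 a 1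
    let n := n >>> 1
    ((bitLoop2 a n n : Nat) : Int) + 1

-- the while-loop of _gf2divmodvect (i counts down; exits when i < 0)
def divLoopA (avec dvec : List Int) (q test i : Int) : Int × List Int :=
  if _h : 0 ≤ i then
    let st :=
      if PySem.Int.band (PySem.List.pyGetD avec 0 0) test ≠ 0 then
        (((avec.zip dvec).map fun (p : Int × Int) => PySem.Int.bxor p.1 (p.2 <<< i)),
         PySem.Int.bor q ((1 : Int) <<< i))
      else (avec, q)
    divLoopA st.1 dvec st.2 (test >>> 1) (i - 1)
  else (q, avec)
termination_by (i + 1).toNat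
decreasing_by omega

-- _gf2divmodvect   (indexing avec[0]/dvec[0] is always in range: rows have length 3;
-- 'test = 1 << (na-1)' raises in Python when na = 0, i.e. when avec[0] == 0;
-- such states are excluded by Pre_)
def gf2divmodvectA (avec dvec : List Int) : Int × List Int :=
  let na := gf2bitlen_pyA (PySem.List.pyGetD avec 0 0)
  let nd := gf2bitlen_pyA (PySem.List.pyGetD dvec 0 0)
  let i := na - nd
  -- Python raises here when na = 0 (negative shift count); Lean's Int<<<Int yields a junk
  -- value instead, unreachable under Pre_
  let test := (1 : Int) <<< (na - 1)
  divLoopA avec dvec 0 test i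

-- the while-True loop of _gf2exteuc; fuel only makes the loop total (each GF(2) remainder is
-- strictly smaller than its divisor, so a.natAbs + b.natAbs + 2 rounds are never exhausted on
-- the inputs admitted by Pre_); on fuel exhaustion it returns the current brow, like the break
def euclidA : Nat → List Int → List Int → Int × Int × Int
  | 0, _, brow =>
      (PySem.List.pyGetD brow 0 0, PySem.List.pyGetD brow 1 0, PySem.List.pyGetD brow 2 0)
  | f + 1, arow, brow =>
      let r := gf2divmodvectA arow brow
      if PySem.List.pyGetD r.2 0 0 = 0 then
        (PySem.List.pyGetD brow 0 0, PySem.List.pyGetD brow 1 0, PySem.List.pyGetD brow 2 0)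
      else euclidA f brow r.2

-- _gf2exteuc
def gf2exteuc_py (a : Int) (b : Int) : Int × Int × Int :=
  euclidA (a.natAbs + b.natAbs + 2) [a, 1, 0] [b, 0, 1]

-- ===== PORT B =====

-- the while-loop of _gf2mul (a halves each round, so a.natAbs + 1 fuel is never exhausted for
-- a >= 0; Python itself diverges for a < 0)
def mulLoopB : Nat → Int → Int → Int → Int
  | 0, _, _, p => p
  | f + 1, a, b, p =>
      if a ≠ 0 then
        mulLoopB f (a >>> 1) (b <<< 1) (if PySem.Int.band a 1 ≠ 0 then PySem.Int.bxor p b else p)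
      else p

-- _gf2mul
def gf2mulB (a b : Int) : Int := mulLoopB (a.natAbs + 1) a b 0

-- the while-True loop of _gf2divmod (the dividend's bit length drops each round, so
-- a.natAbs + 2 fuel is never exhausted when d > 0; Python itself diverges when d == 0)
def divLoopB : Nat → Int → Int → Nat → Int → Int × Int
  | 0, a, _, _, q => (q, a)
  | f + 1, a, d, nd, q =>
      let shift : Int := (PySem.Int.bitLength a : Int) - (nd : Int)
      if shift < 0 then (q, a)
      else divLoopB f (PySem.Int.bxor a (d <<< shift)) d nd
             (PySem.Int.bxor q ((1 : Int) <<< shift))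

-- _gf2divmod
def gf2divmodB (a d : Int) : Int × Int :=
  divLoopB (a.natAbs + 2) a d (PySem.Int.bitLength d) 0

-- the while-True loop of B's _gf2exteuc (same fuel discipline as euclidA)
def euclidB : Nat → Int → Int → Int → Int → Int → Int → Int × Int × Int
  | 0, _, _, _, r1, u1, v1 => (r1, u1, v1)
  | f + 1, r0, u0, v0, r1, u1, v1 =>
      let qr := gf2divmodB r0 r1
      if qr.2 = 0 then (r1, u1, v1)
      else
        euclidB f r1 u1 v1 qr.2 (PySem.Int.bxor u0 (gf2mulB qr.1 u1))
          (PySem.Int.bxor v0 (gf2mulB qr.1 v1))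

def gf2exteuc_py_alt (a : Int) (b : Int) : Int × Int × Int :=
  euclidB (a.natAbs + b.natAbs + 2) a 1 0 b 0 1

-- ===== PRECONDITION & SPEC =====

-- Pre_ excludes nonpositive operands: the inputs are documented as polynomial coefficient bit
-- vectors (nonnegative); with a zero operand A raises ValueError (negative shift count), and on
-- negative operands A (and B) in general diverge — the few negative pairs where A happens to
-- return (e.g. (-1, -1)) are artefacts of Python's infinite two's-complement shifts.
def Pre_gf2exteuc_py (a : Int) (b : Int) : Prop := 0 < a ∧ 0 < b
instance (a : Int) (b : Int) : Decidable (Pre_gf2exteuc_py a b) := by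
  unfold Pre_gf2exteuc_py; infer_instance

def pvWitness_gf2exteuc_py : Int × Int := (7, 3)

def Spec_gf2exteuc_py (a : Int) (b : Int) (out : Int × Int × Int) : Prop :=
  out = gf2exteuc_py_alt a b
instance (a : Int) (b : Int) (out : Int × Int × Int) : Decidable (Spec_gf2exteuc_py a b out) := by
  unfold Spec_gf2exteuc_py; infer_instance

-- ===== CLAIM (what is proved, stated in full; the proofs are below) =====
def Claim_equal_gf2exteuc_py : Prop :=
  ∀ (a : Int) (b : Int), Dom_gf2exteuc_py a b → Pre_gf2exteuc_py a b →
    Spec_gf2exteuc_py a b (gf2exteuc_py a b)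

-- ===== LEMMAS AND PROOFS =====

-- Nat-level bit length (what Python's int.bit_length computes on a nonnegative int)
def blN (x : Nat) : Nat := PySem.Int.bitLength (x : Int)

-- Nat model of B's carry-less multiplication loop
def mulN (q b : Nat) : Nat :=
  if h : q = 0 then 0 else (if q % 2 = 1 then b else 0) ^^^ mulN (q / 2) (2 * b)
termination_by q
decreasing_by exact Nat.div_lt_self (Nat.pos_of_ne_zero h) one_lt_two

-- Nat model of B's division loop
def jumpN (d nd : Nat) : Nat → Nat → Nat → Nat × Nat
  | 0, x, q => (q, x)
  | f + 1, x, q =>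
      if blN x < nd then (q, x)
      else jumpN d nd f (x ^^^ (d <<< (blN x - nd))) (q ^^^ (1 <<< (blN x - nd)))

-- Nat model of A's division loop over a 3-row (x = leading entry, u v = coefficients, q = quotient)
def scanN (d du dv nd : Nat) : Nat → Nat × Nat × Nat × Nat → Nat × Nat × Nat × Nat
  | 0, s => s
  | c + 1, (x, u, v, q) =>
      scanN d du dv nd c
        (if x.testBit (nd - 1 + c) then
          (x ^^^ (d <<< c), u ^^^ (du <<< c), v ^^^ (dv <<< c), q ||| (1 <<< c))
        else (x, u, v, q))

-- ---- generic bit facts ----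

theorem pvBlNLeIff (x m : Nat) : blN x ≤ m ↔ x < 2 ^ m := by
  constructor
  · intro h
    have h1 := PySem.Int.lt_two_pow_bitLength (x : Int)
    simp only [Int.natAbs_natCast] at h1
    exact lt_of_lt_of_le h1 (Nat.pow_le_pow_right (by norm_num) h)
  · intro h
    by_contra hc
    rw [Nat.not_le] at hc
    have hx0 : x ≠ 0 := by
      intro h0; subst h0
      simp [blN, PySem.Int.bitLength_zero] at hc
    have h2 : 2 ^ (blN x - 1) ≤ x := by
      unfold blN; simpa using PySem.Int.two_pow_bitLength_le (x : Int) (by exact_mod_cast hx0)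
    have : (2:Nat) ^ m ≤ 2 ^ (blN x - 1) := Nat.pow_le_pow_right (by norm_num) (by omega)
    omega
theorem pvBlNEq (x m : Nat) (h1 : 2 ^ m ≤ x) (h2 : x < 2 ^ (m + 1)) : blN x = m + 1 := by
  have ha : blN x ≤ m + 1 := (pvBlNLeIff x (m+1)).mpr h2
  have hb : ¬ blN x ≤ m := by
    intro h; have := (pvBlNLeIff x m).mp h; omega
  omega
theorem pvBlNLeSelf (x : Nat) : blN x ≤ x + 1 := by
  have := (pvBlNLeIff x (x+1)).mpr (lt_of_le_of_lt (Nat.le_succ x) Nat.lt_two_pow_self)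
  omega
theorem pvTestBitOfBracket (x k : Nat) (h1 : 2 ^ k ≤ x) (h2 : x < 2 ^ (k + 1)) :
    x.testBit k = true := by
  rw [Nat.testBit_eq_decide_div_mod_eq]
  have hp : 0 < (2:Nat) ^ k := Nat.two_pow_pos k
  have hlo : 1 ≤ x / 2 ^ k := (Nat.le_div_iff_mul_le hp).mpr (by omega)
  have hhi : x / 2 ^ k < 2 := (Nat.div_lt_iff_lt_mul hp).mpr (by rw [pow_succ] at h2; omega)
  have : x / 2 ^ k = 1 := by omega
  simp [this]
theorem pvLtOfTestBitFalse (x k : Nat) (h1 : x < 2 ^ (k + 1)) (h2 : x.testBit k = false) :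
    x < 2 ^ k := by
  by_contra hc
  rw [Nat.not_lt] at hc
  rw [pvTestBitOfBracket x k hc h1] at h2
  exact Bool.true_eq_false.mp h2
theorem pvXorTopCancel (a b k : Nat) (ha : a < 2 ^ (k + 1)) (hb : b < 2 ^ (k + 1))
    (hta : a.testBit k = true) (htb : b.testBit k = true) : a ^^^ b < 2 ^ k := by
  apply Nat.lt_pow_two_of_testBit
  intro i hi
  rw [Nat.testBit_xor]
  rcases Nat.eq_or_lt_of_le hi with h | h
  · rw [← h, hta, htb]; simp
  · have h1 : a.testBit i = false := by
      by_contra hc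
      have := Nat.ge_two_pow_of_testBit (Bool.of_not_eq_false hc)
      have : (2:Nat) ^ (k+1) ≤ 2 ^ i := Nat.pow_le_pow_right (by norm_num) h
      omega
    have h2 : b.testBit i = false := by
      by_contra hc
      have := Nat.ge_two_pow_of_testBit (Bool.of_not_eq_false hc)
      have : (2:Nat) ^ (k+1) ≤ 2 ^ i := Nat.pow_le_pow_right (by norm_num) h
      omega
    rw [h1, h2]; simp
theorem pvTestBitFalseOfMod (q c : Nat) (h : q % 2 ^ (c + 1) = 0) : q.testBit c = false := by
  rw [Nat.testBit_eq_decide_div_mod_eq]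
  obtain ⟨t, rfl⟩ : ∃ t, q = 2 ^ (c+1) * t :=
    ⟨q / 2^(c+1), (Nat.mul_div_cancel' (Nat.dvd_of_mod_eq_zero h)).symm⟩
  have he : 2 ^ (c+1) * t = 2 ^ c * (2 * t) := by ring
  rw [he, Nat.mul_div_cancel_left _ (Nat.two_pow_pos c)]
  simp [Nat.mul_mod_right]

theorem pvPowDisjoint (q c : Nat) (h : q % 2 ^ (c + 1) = 0) :
    q ||| 2 ^ c = q + 2 ^ c ∧ q ^^^ 2 ^ c = q + 2 ^ c := by
  have hb := pvTestBitFalseOfMod q c h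
  have hor : q ||| 2 ^ c = q ^^^ 2 ^ c := by
    apply Nat.eq_of_testBit_eq
    intro i
    rw [Nat.testBit_or, Nat.testBit_xor, Nat.testBit_two_pow]
    by_cases hic : c = i
    · subst hic; rw [hb]; simp
    · simp [hic]
  have hadd : q ||| 2 ^ c = q + 2 ^ c := by
    obtain ⟨t, rfl⟩ : ∃ t, q = 2 ^ (c+1) * t :=
      ⟨q / 2^(c+1), (Nat.mul_div_cancel' (Nat.dvd_of_mod_eq_zero h)).symm⟩
    exact (Nat.two_pow_add_eq_or_of_lt (b := 2^c)
      (by exact Nat.pow_lt_pow_right (by norm_num) (Nat.lt_succ_self c)) t).symm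
  exact ⟨hadd, hor ▸ hadd⟩
theorem pvModPowSucc (q c : Nat) (h : q % 2 ^ (c + 1) = 0) : q % 2 ^ c = 0 := by
  have h2 : q % 2 ^ (c + 1) % 2 ^ c = q % 2 ^ c :=
    Nat.mod_mod_of_dvd q (pow_dvd_pow 2 (Nat.le_succ c))
  simpa [h] using h2.symm

-- ---- mulN facts ----

theorem pvMulNZero (b : Nat) : mulN 0 b = 0 := by rw [mulN]; simp

theorem pvMulNEven (q b : Nat) (h : q % 2 = 0) : mulN q b = mulN (q / 2) (2 * b) := by
  by_cases hq : q = 0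
  · subst hq; rw [pvMulNZero]; norm_num; rw [pvMulNZero]
  · rw [mulN]; simp [hq, h]
theorem pvXorModTwo (x y : Nat) : (x ^^^ y) % 2 = (x % 2 + y % 2) % 2 := by
  have hiff := Nat.xor_mod_two_eq_one (a := x) (b := y)
  have hz := Nat.mod_two_eq_zero_or_one (x ^^^ y)
  have h1 := Nat.mod_two_eq_zero_or_one x
  have h2 := Nat.mod_two_eq_zero_or_one y
  rcases h1 with h1 | h1 <;> rcases h2 with h2 | h2 <;> simp [h1, h2] at hiff ⊢ <;> omega

theorem pvMulNOdd (q b : Nat) (hq : q % 2 = 1) : mulN q b = b ^^^ mulN (q / 2) (2 * b) := by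
  rw [mulN]; simp [show q ≠ 0 by omega, hq]

theorem pvMulNXor (x y b : Nat) : mulN (x ^^^ y) b = mulN x b ^^^ mulN y b := by
  induction x using Nat.strong_induction_on generalizing y b with
  | _ x ih =>
    by_cases hx : x = 0
    · subst hx; simp [pvMulNZero]
    by_cases hy : y = 0
    · subst hy; simp [pvMulNZero]
    have hdiv : (x ^^^ y) / 2 = x / 2 ^^^ y / 2 := Nat.xor_div_two
    have hx2 : x / 2 < x := Nat.div_lt_self (Nat.pos_of_ne_zero hx) one_lt_two
    have ihh := ih (x / 2) hx2 (y / 2) (2 * b)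
    have hpar := pvXorModTwo x y
    rcases Nat.mod_two_eq_zero_or_one x with h1 | h1 <;>
      rcases Nat.mod_two_eq_zero_or_one y with h2 | h2
    · rw [pvMulNEven x b h1, pvMulNEven y b h2,
        pvMulNEven (x ^^^ y) b (by omega), hdiv, ihh]
    · rw [pvMulNEven x b h1, pvMulNOdd y b h2,
        pvMulNOdd (x ^^^ y) b (by omega), hdiv, ihh]
      ac_rfl
    · rw [pvMulNOdd x b h1, pvMulNEven y b h2,
        pvMulNOdd (x ^^^ y) b (by omega), hdiv, ihh, Nat.xor_assoc]
    · rw [pvMulNOdd x b h1, pvMulNOdd y b h2,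
        pvMulNEven (x ^^^ y) b (by omega), hdiv, ihh]
      rw [← Nat.xor_assoc, Nat.xor_assoc b _ b, Nat.xor_comm _ b, ← Nat.xor_assoc b b,
        Nat.xor_self, Nat.zero_xor]
theorem pvMulNTwoPow (c b : Nat) : mulN (2 ^ c) b = b <<< c := by
  induction c generalizing b with
  | zero => rw [pow_zero, pvMulNOdd 1 b (by norm_num)]; simp [pvMulNZero]
  | succ c ih =>
    rw [pvMulNEven _ b (by simp [Nat.pow_succ, Nat.mul_mod_left])]
    have : 2 ^ (c + 1) / 2 = 2 ^ c := by rw [pow_succ, Nat.mul_div_cancel _ (by norm_num)]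
    rw [this, ih, Nat.shiftLeft_eq, Nat.shiftLeft_eq, pow_succ]
    ring
-- ---- the scan/jump correspondence (A's per-bit scan = B's bit_length jumps) ----

theorem pvXorCancelMid (u D M : Nat) : (u ^^^ D) ^^^ (M ^^^ D) = u ^^^ M := by
  rw [Nat.xor_assoc]; congr 1
  rw [Nat.xor_comm M D, ← Nat.xor_assoc, Nat.xor_self, Nat.zero_xor]

theorem pvScanJump (d du dv nd : Nat) (hd : 0 < d) (hnd : blN d = nd) :
    ∀ (c f x u v q : Nat), x < 2 ^ (nd - 1 + c) → c ≤ f → q % 2 ^ c = 0 →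
      scanN d du dv nd c (x, u, v, q) =
        ((jumpN d nd f x q).2, u ^^^ mulN ((jumpN d nd f x q).1 ^^^ q) du,
         v ^^^ mulN ((jumpN d nd f x q).1 ^^^ q) dv, (jumpN d nd f x q).1) := by
  have hnd1 : 1 ≤ nd := by
    rcases Nat.eq_zero_or_pos nd with h | h
    · exfalso
      have := (pvBlNLeIff d 0).mp (by omega)
      omega
    · exact h
  obtain ⟨m, rfl⟩ : ∃ m, nd = m + 1 := ⟨nd - 1, by omega⟩
  simp only [Nat.add_sub_cancel]
  intro c
  induction c with
  | zero =>
    intro f x u v q hx _ hq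
    have hblx : blN x ≤ m := (pvBlNLeIff x m).mpr (by simpa using hx)
    have hj : jumpN d (m + 1) f x q = (q, x) := by
      cases f with
      | zero => rfl
      | succ f' => simp [jumpN, show blN x < m + 1 by omega]
    rw [hj]
    simp [scanN, pvMulNZero]
  | succ c ih =>
    intro f x u v q hx hf hq
    have hdlt : d < 2 ^ (m + 1) := (pvBlNLeIff d (m + 1)).mp (by omega)
    have hdtop : (2:Nat) ^ m ≤ d := by
      have h2 := PySem.Int.two_pow_bitLength_le (d : Int) (by exact_mod_cast hd.ne')
      have h3 : PySem.Int.bitLength (d : Int) = m + 1 := hnd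
      rw [h3] at h2; simpa using h2
    show scanN d du dv (m + 1) (c + 1) (x, u, v, q) = _
    rw [scanN]
    simp only [show m + 1 - 1 + c = m + c from by omega]
    by_cases hb : x.testBit (m + c) = true
    · have htop : 2 ^ (m + c) ≤ x := Nat.ge_two_pow_of_testBit hb
      have hblx : blN x = m + c + 1 := pvBlNEq x (m + c) htop (by
        have : m + (c + 1) = m + c + 1 := by omega
        rw [this] at hx; exact hx)
      obtain ⟨f', rfl⟩ : ∃ f', f = f' + 1 := ⟨f - 1, by omega⟩
      have hju : jumpN d (m + 1) (f' + 1) x q =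
          jumpN d (m + 1) f' (x ^^^ (d <<< c)) (q ^^^ (1 <<< c)) := by
        rw [jumpN]
        simp [hblx, show ¬ (m + c + 1 < m + 1) by omega,
          show m + c + 1 - (m + 1) = c by omega]
      have hxor : x ^^^ (d <<< c) < 2 ^ (m + c) := by
        apply pvXorTopCancel x (d <<< c) (m + c)
        · have : m + (c + 1) = m + c + 1 := by omega
          rw [this] at hx; exact hx
        · rw [Nat.shiftLeft_eq]
          calc d * 2 ^ c < 2 ^ (m + 1) * 2 ^ c := by
                exact (Nat.mul_lt_mul_right (Nat.two_pow_pos c)).mpr hdlt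
            _ = 2 ^ (m + c + 1) := by rw [← pow_add]; ring_nf
        · exact hb
        · rw [Nat.testBit_shiftLeft]
          simp [show m + c ≥ c by omega, show m + c - c = m by omega]
          exact pvTestBitOfBracket d m hdtop hdlt
      have hdisj := pvPowDisjoint q c hq
      have hq' : (q ^^^ 2 ^ c) % 2 ^ c = 0 := by
        rw [hdisj.2, Nat.add_mod_right]
        exact pvModPowSucc q c hq
      rw [hb]
      simp only [if_true]
      rw [Nat.one_shiftLeft, hdisj.1, ← hdisj.2]
      rw [ih f' (x ^^^ (d <<< c)) (u ^^^ (du <<< c)) (v ^^^ (dv <<< c)) (q ^^^ 2 ^ c)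
        hxor (by omega) hq']
      rw [hju, Nat.one_shiftLeft]
      refine Prod.ext rfl (Prod.ext ?_ (Prod.ext ?_ rfl)) <;> · 
        show _ ^^^ mulN (_ ^^^ (q ^^^ 2 ^ c)) _ = _ ^^^ mulN (_ ^^^ q) _
        rw [show (jumpN d (m+1) f' (x ^^^ (d <<< c)) (q ^^^ 2 ^ c)).1 ^^^ (q ^^^ 2 ^ c) =
             ((jumpN d (m+1) f' (x ^^^ (d <<< c)) (q ^^^ 2 ^ c)).1 ^^^ q) ^^^ 2 ^ c by
               rw [Nat.xor_assoc]]
        rw [pvMulNXor, pvMulNTwoPow, pvXorCancelMid]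
    · have hb' : x.testBit (m + c) = false := by
        cases hxb : x.testBit (m + c)
        · rfl
        · exact absurd hxb hb
      have hxlt : x < 2 ^ (m + c) := pvLtOfTestBitFalse x (m + c) (by
          have : m + (c + 1) = m + c + 1 := by omega
          rw [this] at hx; exact hx) hb'
      rw [hb']
      simp only [Bool.false_eq_true, if_false]
      exact ih f x u v q (by omega) (by omega) (pvModPowSucc q c hq)

-- ---- bridges between the Int ports and the Nat models ----

theorem pvIntSrCast (m n : Nat) : ((m : Int) >>> n) = ((m >>> n : Nat) : Int) := rfl

theorem pvIntSrPos (m n : Nat) : (0 < (m : Int) >>> n) ↔ 2 ^ n ≤ m := by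
  rw [pvIntSrCast]
  rw [Nat.shiftRight_eq_div_pow]
  have hp := Nat.two_pow_pos n
  constructor
  · intro h
    have : 0 < m / 2 ^ n := by exact_mod_cast h
    have := Nat.le_div_iff_mul_le hp |>.mp this
    omega
  · intro h
    have : 1 ≤ m / 2 ^ n := (Nat.le_div_iff_mul_le hp).mpr (by omega)
    exact_mod_cast this

theorem pvBitLoop1Spec (A : Nat) : ∀ n : Nat, 0 < n →
    A < 2 ^ bitLoop1 (A : Int) n ∧
    (bitLoop1 (A : Int) n = n ∨ 2 ^ (bitLoop1 (A : Int) n / 2) ≤ A) ∧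
    ∃ j, bitLoop1 (A : Int) n = n * 2 ^ j := by
  intro n hn
  induction n using bitLoop1.induct (a := (A : Int)) with
  | case1 n h ih =>
    rw [bitLoop1, dif_pos h]
    have hg : 2 ^ n ≤ A := (pvIntSrPos A n).mp h.1
    obtain ⟨ih1, ih2, j, ih3⟩ := ih (by omega)
    refine ⟨ih1, ?_, j + 1, by rw [ih3]; ring⟩
    rcases ih2 with h2 | h2
    · right
      rw [h2, Nat.mul_div_cancel_left n (by norm_num)]
      exact hg
    · right; exact h2
  | case2 n h =>
    rw [bitLoop1, dif_neg h]
    have hng : ¬ 2 ^ n ≤ A := fun hc => h ⟨(pvIntSrPos A n).mpr hc, hn⟩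
    exact ⟨by omega, Or.inl rfl, 0, by ring⟩

theorem pvBitLoop2Spec (A : Nat) : ∀ (j n : Nat), n % 2 ^ j = 0 → 2 ^ n ≤ A →
    A < 2 ^ (n + 2 ^ j) →
    2 ^ bitLoop2 (A : Int) n (2 ^ j) ≤ A ∧ A < 2 ^ (bitLoop2 (A : Int) n (2 ^ j) + 1) := by
  intro j
  induction j with
  | zero =>
    intro n _ h1 h2
    rw [bitLoop2, dif_pos (by norm_num : 0 < 2 ^ 0)]
    have e0 : (2 ^ 0 : Nat) >>> 1 = 0 := rfl
    rw [e0]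
    dsimp only
    simp only [Nat.xor_zero]
    rw [if_pos ((pvIntSrPos A n).mpr h1)]
    rw [bitLoop2, dif_neg (by norm_num)]
    exact ⟨h1, by simpa using h2⟩
  | succ j ih =>
    intro n hmod h1 h2
    rw [bitLoop2, dif_pos (Nat.two_pow_pos (j + 1))]
    have e0 : (2 ^ (j + 1) : Nat) >>> 1 = 2 ^ j := by
      rw [Nat.shiftRight_one, pow_succ, Nat.mul_div_cancel _ (by norm_num)]
    rw [e0]
    dsimp only
    have hxor : n ^^^ 2 ^ j = n + 2 ^ j := (pvPowDisjoint n j hmod).2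
    rw [hxor]
    have hp : (2:Nat) ^ (j + 1) = 2 ^ j + 2 ^ j := by rw [pow_succ]; ring
    by_cases hc : 2 ^ (n + 2 ^ j) ≤ A
    · rw [if_pos ((pvIntSrPos A (n + 2 ^ j)).mpr hc)]
      exact ih (n + 2 ^ j) (by rw [Nat.add_mod_right]; exact pvModPowSucc n j hmod) hc
        (by rw [show n + 2 ^ j + 2 ^ j = n + 2 ^ (j + 1) from by omega]; exact h2)
    · rw [if_neg (fun hc2 => hc ((pvIntSrPos A (n + 2 ^ j)).mp hc2))]
      exact ih n (pvModPowSucc n j hmod) h1 (by omega)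

theorem pvBitlenBridge (x : Nat) (hx : 0 < x) : gf2bitlen_pyA (x : Int) = (blN x : Int) := by
  unfold gf2bitlen_pyA
  rw [if_neg (by exact_mod_cast hx.ne')]
  obtain ⟨h1, h2, j, h3⟩ := pvBitLoop1Spec x 1 (by norm_num)
  rw [h3] at h1 h2 ⊢
  simp only [Nat.one_mul] at h1 h2 ⊢
  cases j with
  | zero =>
    have e0 : (2 ^ 0 : Nat) >>> 1 = 0 := rfl
    rw [e0, bitLoop2, dif_neg (by norm_num)]
    have hx1 : x = 1 := by
      have : x < 2 := by simpa using h1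
      omega
    subst hx1
    have : blN 1 = 1 := pvBlNEq 1 0 (by norm_num) (by norm_num)
    rw [this]
    norm_num
  | succ j' =>
    have e0 : (2 ^ (j' + 1) : Nat) >>> 1 = 2 ^ j' := by
      rw [Nat.shiftRight_one, pow_succ, Nat.mul_div_cancel _ (by norm_num)]
    rw [e0]
    have hlow : 2 ^ (2 ^ j' : Nat) ≤ x := by
      rcases h2 with h2 | h2
      · exfalso
        have : (2:Nat) ≤ 2 ^ (j' + 1) := by
          calc (2:Nat) = 2 ^ 1 := rfl
            _ ≤ 2 ^ (j' + 1) := Nat.pow_le_pow_right (by norm_num) (by omega)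
        omega
      · rwa [pow_succ, Nat.mul_div_cancel _ (by norm_num)] at h2
    obtain ⟨hb1, hb2⟩ := pvBitLoop2Spec x j' (2 ^ j') (Nat.mod_self _) hlow
      (by rw [show (2:Nat) ^ j' + 2 ^ j' = 2 ^ (j' + 1) from by rw [pow_succ]; ring]; exact h1)
    have := pvBlNEq x (bitLoop2 (x : Int) (2 ^ j') (2 ^ j')) hb1 hb2
    rw [this]
    push_cast
    ring

theorem pvIntSlCastI (m k : Nat) : ((m : Int) <<< ((k : Nat) : Int)) = ((m <<< k : Nat) : Int) := by
  simp [Int.shiftLeft_eq]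

theorem pvIntSl1 (k : Nat) : ((1 : Int) <<< ((k : Nat) : Int)) = ((1 <<< k : Nat) : Int) := by
  have := pvIntSlCastI 1 k
  simpa using this

theorem pvBandTwoPow (x e : Nat) :
    (PySem.Int.band (x : Int) ((2 ^ e : Nat) : Int) ≠ 0) ↔ x.testBit e = true := by
  rw [PySem.Int.band_natCast, Nat.and_two_pow]
  cases h : x.testBit e
  · simp
  · simp

theorem pvDivLoopABridge (d du dv nd : Nat) :
    ∀ (c x u v q : Nat),
      divLoopA [(x : Int), (u : Int), (v : Int)] [(d : Int), (du : Int), (dv : Int)]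
          (q : Int) ((2 ^ (nd - 1 + c) : Nat) : Int) (c : Int) =
        (((scanN d du dv nd (c + 1) (x, u, v, q)).2.2.2 : Int),
         [((scanN d du dv nd (c + 1) (x, u, v, q)).1 : Int),
          ((scanN d du dv nd (c + 1) (x, u, v, q)).2.1 : Int),
          ((scanN d du dv nd (c + 1) (x, u, v, q)).2.2.1 : Int)]) := by
  intro c
  induction c with
  | zero =>
    intro x u v q
    rw [divLoopA, dif_pos (by simp : (0 : Int) ≤ ((0 : Nat) : Int))]
    simp only [PySem.List.pyGetD_zero_cons, List.zip_cons_cons, List.zip_nil_right, List.map_cons, List.map_nil]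
    rw [show (((0 : Nat) : Int) - 1) = (-1 : Int) by simp]
    rw [show scanN d du dv nd (0 + 1) (x, u, v, q) =
      (if x.testBit (nd - 1 + 0) then
        (x ^^^ (d <<< 0), u ^^^ (du <<< 0), v ^^^ (dv <<< 0), q ||| (1 <<< 0))
      else (x, u, v, q)) from rfl]
    by_cases hb : x.testBit (nd - 1 + 0) = true
    · rw [if_pos ((pvBandTwoPow x (nd - 1 + 0)).mpr hb), if_pos hb]
      rw [divLoopA, dif_neg (by norm_num)]
      rw [pvIntSlCastI d 0, pvIntSlCastI du 0, pvIntSlCastI dv 0, pvIntSl1 0]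
      simp only [PySem.Int.bxor_natCast, PySem.Int.bor_natCast]
    · rw [if_neg (fun hc => hb ((pvBandTwoPow x (nd - 1 + 0)).mp hc)), if_neg hb]
      rw [divLoopA, dif_neg (by norm_num)]
  | succ c ih =>
    intro x u v q
    rw [divLoopA, dif_pos (by exact_mod_cast Int.natCast_nonneg (c + 1))]
    simp only [PySem.List.pyGetD_zero_cons, List.zip_cons_cons, List.zip_nil_right, List.map_cons, List.map_nil]
    have hi : (((c + 1 : Nat) : Int) - 1) = ((c : Nat) : Int) := by push_cast; ring
    have ht : (((2 ^ (nd - 1 + (c + 1)) : Nat) : Int) >>> (1 : Int)) =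
        ((2 ^ (nd - 1 + c) : Nat) : Int) := by
      rw [show (((2 ^ (nd - 1 + (c + 1)) : Nat) : Int) >>> (1 : Int)) =
        ((2 ^ (nd - 1 + (c + 1)) >>> 1 : Nat) : Int) from rfl]
      rw [Nat.shiftRight_one, show nd - 1 + (c + 1) = (nd - 1 + c) + 1 from rfl, pow_succ,
        Nat.mul_div_cancel _ (by norm_num)]
    rw [hi, ht]
    rw [show scanN d du dv nd (c + 1 + 1) (x, u, v, q) =
      scanN d du dv nd (c + 1) (if x.testBit (nd - 1 + (c + 1)) then
        (x ^^^ (d <<< (c + 1)), u ^^^ (du <<< (c + 1)), v ^^^ (dv <<< (c + 1)),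
         q ||| (1 <<< (c + 1)))
      else (x, u, v, q)) from rfl]
    by_cases hb : x.testBit (nd - 1 + (c + 1)) = true
    · rw [if_pos ((pvBandTwoPow x (nd - 1 + (c + 1))).mpr hb), if_pos hb]
      rw [pvIntSlCastI d (c + 1), pvIntSlCastI du (c + 1), pvIntSlCastI dv (c + 1),
        pvIntSl1 (c + 1)]
      simp only [PySem.Int.bxor_natCast, PySem.Int.bor_natCast]
      exact ih (x ^^^ (d <<< (c + 1))) (u ^^^ (du <<< (c + 1))) (v ^^^ (dv <<< (c + 1)))
        (q ||| (1 <<< (c + 1)))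
    · rw [if_neg (fun hc => hb ((pvBandTwoPow x (nd - 1 + (c + 1))).mp hc)), if_neg hb]
      exact ih x u v q

theorem pvDivLoopBBridge (d nd : Nat) :
    ∀ (f : Nat) (x q : Nat),
      divLoopB f (x : Int) (d : Int) nd (q : Int) =
        (((jumpN d nd f x q).1 : Int), ((jumpN d nd f x q).2 : Int)) := by
  intro f
  induction f with
  | zero => intro x q; rfl
  | succ f ih =>
    intro x q
    show divLoopB (f + 1) (x : Int) (d : Int) nd (q : Int) = _
    rw [divLoopB]
    have hbl : PySem.Int.bitLength ((x : Nat) : Int) = blN x := rfl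
    rw [hbl]
    by_cases hc : blN x < nd
    · rw [if_pos (show ((blN x : Int) - (nd : Int)) < 0 by omega)]
      rw [jumpN, if_pos hc]
    · rw [if_neg (show ¬ ((blN x : Int) - (nd : Int)) < 0 by omega)]
      have hsub : ((blN x : Int) - (nd : Int)) = ((blN x - nd : Nat) : Int) := by omega
      rw [hsub, pvIntSlCastI, pvIntSl1]
      simp only [PySem.Int.bxor_natCast]
      rw [ih]
      rw [jumpN, if_neg hc]

theorem pvMulBridge : ∀ (f q b p : Nat), q < f →
    mulLoopB f (q : Int) (b : Int) (p : Int) = ((p ^^^ mulN q b : Nat) : Int) := by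
  intro f
  induction f with
  | zero => intro q b p h; omega
  | succ f ih =>
    intro q b p h
    by_cases hq : q = 0
    · subst hq
      show mulLoopB (f + 1) ((0 : Nat) : Int) (b : Int) (p : Int) = _
      rw [mulLoopB]
      simp [pvMulNZero]
    · show mulLoopB (f + 1) (q : Int) (b : Int) (p : Int) = _
      rw [mulLoopB]
      rw [if_pos (by exact_mod_cast hq)]
      have e1 : ((q : Int) >>> (1 : Int)) = ((q / 2 : Nat) : Int) := by
        rw [show ((q : Int) >>> (1 : Int)) = ((q >>> 1 : Nat) : Int) from rfl,
          Nat.shiftRight_one]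
      have e2 : ((b : Int) <<< (1 : Int)) = ((2 * b : Nat) : Int) := by
        rw [show ((1 : Int)) = (((1 : Nat)) : Int) from rfl, pvIntSlCastI b 1,
          Nat.shiftLeft_eq, pow_one, Nat.mul_comm]
      have e3 : PySem.Int.band (q : Int) 1 = ((q % 2 : Nat) : Int) := by
        rw [show ((1 : Int)) = (((1 : Nat)) : Int) from rfl, PySem.Int.band_natCast,
          Nat.and_one_is_mod]
      rw [e1, e2, e3]
      have hp' : (if ((q % 2 : Nat) : Int) ≠ 0 then PySem.Int.bxor (p : Int) (b : Int)
          else (p : Int)) = (((p ^^^ if q % 2 = 1 then b else 0 : Nat)) : Int) := by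
        rcases Nat.mod_two_eq_zero_or_one q with h2 | h2 <;> simp [h2]
      rw [hp']
      rw [ih (q / 2) (2 * b) _ (by omega)]
      congr 1
      rcases Nat.mod_two_eq_zero_or_one q with h2 | h2
      · rw [pvMulNEven q b h2]
        simp [h2]
      · rw [pvMulNOdd q b h2]
        simp [h2, Nat.xor_assoc]

theorem pvGf2MulBridge (q b : Nat) : gf2mulB (q : Int) (b : Int) = ((mulN q b : Nat) : Int) := by
  unfold gf2mulB
  rw [show ((q : Int).natAbs + 1) = q + 1 by simp]
  have := pvMulBridge (q + 1) q b 0 (by omega)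
  simpa using this

-- one division step: A's vectorized divmod on the rows equals B's scalar divmod plus
-- carry-less multiplication of the coefficients by the quotient
theorem pvStep (x0 u0 v0 y0 u1 v1 : Nat) (hx : 0 < x0) (hy : 0 < y0) :
    gf2divmodvectA [(x0 : Int), (u0 : Int), (v0 : Int)] [(y0 : Int), (u1 : Int), (v1 : Int)] =
      (((jumpN y0 (blN y0) (x0 + 2) x0 0).1 : Int),
       [((jumpN y0 (blN y0) (x0 + 2) x0 0).2 : Int),
        ((u0 ^^^ mulN (jumpN y0 (blN y0) (x0 + 2) x0 0).1 u1 : Nat) : Int),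
        ((v0 ^^^ mulN (jumpN y0 (blN y0) (x0 + 2) x0 0).1 v1 : Nat) : Int)]) := by
  have hnd1 : 1 ≤ blN y0 := by
    by_contra hc
    have := (pvBlNLeIff y0 0).mp (by omega)
    omega
  have hx1 : 1 ≤ blN x0 := by
    by_contra hc
    have := (pvBlNLeIff x0 0).mp (by omega)
    omega
  unfold gf2divmodvectA
  simp only [PySem.List.pyGetD_zero_cons]
  rw [pvBitlenBridge x0 hx, pvBitlenBridge y0 hy]
  by_cases hlt : blN x0 < blN y0
  · rw [divLoopA, dif_neg (show ¬ (0:Int) ≤ ((blN x0 : Int) - (blN y0 : Int)) by omega)]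
    rw [show x0 + 2 = (x0 + 1) + 1 from rfl, jumpN, if_pos hlt]
    simp [pvMulNZero]
  · have hc : blN x0 = blN y0 + (blN x0 - blN y0) := by omega
    set c := blN x0 - blN y0 with hcdef
    have hi : ((blN x0 : Int) - (blN y0 : Int)) = ((c : Nat) : Int) := by omega
    have htest : ((1 : Int) <<< ((blN x0 : Int) - 1)) =
        ((2 ^ (blN y0 - 1 + c) : Nat) : Int) := by
      rw [show ((blN x0 : Int) - 1) = ((blN x0 - 1 : Nat) : Int) by omega, pvIntSl1,
        Nat.one_shiftLeft, show blN x0 - 1 = blN y0 - 1 + c by omega]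
    rw [hi, htest]
    have hbr := pvDivLoopABridge y0 u1 v1 (blN y0) c x0 u0 v0 0
    simp only [Nat.cast_zero] at hbr
    rw [hbr]
    rw [pvScanJump y0 u1 v1 (blN y0) hy rfl (c + 1) (x0 + 2) x0 u0 v0 0
      (by rw [show blN y0 - 1 + (c + 1) = blN x0 by omega]
          exact (pvBlNLeIff x0 (blN x0)).mp le_rfl)
      (by have := pvBlNLeSelf x0; omega)
      (Nat.zero_mod _)]
    simp [Nat.xor_zero]

theorem pvMain : ∀ (f : Nat) (x0 u0 v0 y0 u1 v1 : Nat), 0 < x0 → 0 < y0 →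
    euclidA f [(x0 : Int), (u0 : Int), (v0 : Int)] [(y0 : Int), (u1 : Int), (v1 : Int)] =
      euclidB f (x0 : Int) (u0 : Int) (v0 : Int) (y0 : Int) (u1 : Int) (v1 : Int) := by
  intro f
  induction f with
  | zero => intro x0 u0 v0 y0 u1 v1 _ _; rfl
  | succ f ih =>
    intro x0 u0 v0 y0 u1 v1 hx hy
    rw [euclidA, euclidB]
    have hdm : gf2divmodB (x0 : Int) (y0 : Int) =
        (((jumpN y0 (blN y0) (x0 + 2) x0 0).1 : Int),
         ((jumpN y0 (blN y0) (x0 + 2) x0 0).2 : Int)) := by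
      unfold gf2divmodB
      rw [show ((x0 : Int).natAbs + 2) = x0 + 2 by simp]
      exact pvDivLoopBBridge y0 (blN y0) (x0 + 2) x0 0
    rw [pvStep x0 u0 v0 y0 u1 v1 hx hy, hdm]
    dsimp only
    simp only [PySem.List.pyGetD_zero_cons]
    by_cases hz : (jumpN y0 (blN y0) (x0 + 2) x0 0).2 = 0
    · rw [if_pos (by exact_mod_cast hz), if_pos (by exact_mod_cast hz)]
      rfl
    · rw [if_neg (by exact_mod_cast hz), if_neg (by exact_mod_cast hz)]
      rw [pvGf2MulBridge, pvGf2MulBridge]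
      simp only [PySem.Int.bxor_natCast]
      exact ih y0 u1 v1 (jumpN y0 (blN y0) (x0 + 2) x0 0).2
        (u0 ^^^ mulN (jumpN y0 (blN y0) (x0 + 2) x0 0).1 u1)
        (v0 ^^^ mulN (jumpN y0 (blN y0) (x0 + 2) x0 0).1 v1) hy (by omega)

-- ===== VERDICT (by name: the statement is the Claim_ definition above) =====
theorem gf2exteuc_py_spec : Claim_equal_gf2exteuc_py := by
  intro a b _hdom hpre
  obtain ⟨ha, hb⟩ := hpre
  unfold Spec_gf2exteuc_py gf2exteuc_py gf2exteuc_py_alt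
  obtain ⟨x, rfl⟩ : ∃ x : Nat, a = (x : Int) := ⟨a.toNat, (Int.toNat_of_nonneg ha.le).symm⟩
  obtain ⟨y, rfl⟩ : ∃ y : Nat, b = (y : Int) := ⟨b.toNat, (Int.toNat_of_nonneg hb.le).symm⟩
  have hx : 0 < x := by exact_mod_cast ha
  have hy : 0 < y := by exact_mod_cast hb
  have h := pvMain ((x : Int).natAbs + (y : Int).natAbs + 2) x 1 0 y 0 1 hx hy
  simpa using h
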